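-- pv_equiv track=rewrite | github.com/kennorsdb/nlppen | nlppen/extraccion/utils/misc.py | limpiarResolucion
-- ===== SOURCE A (Python) =====
-- def limpiarResolucion(resolucionCompleta):
--     resolucion = ""
--     addNumber = False
--     for char in resolucionCompleta:
--         if addNumber:
--             resolucion += char
--         else:
--             if char.isdigit() == True:
--                 addNumber = True
--                 resolucion += char
--     return resolucion
-- ===== SOURCE B (Python) =====
-- def limpiarResolucion(resolucionCompleta):
--     for i, ch in enumerate(resolucionCompleta):
--         if ch.isdigit():
--             return resolucionCompleta[i:]
--     return ""
-- ===== Notes on version B (the rewrite author's own statement) =====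
-- stated objective: simpler
-- what changed: B scans only for the index of the first digit and returns one slice from there (empty string if none), instead of A's char-by-char accumulation with a boolean flag.
import Mathlib
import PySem

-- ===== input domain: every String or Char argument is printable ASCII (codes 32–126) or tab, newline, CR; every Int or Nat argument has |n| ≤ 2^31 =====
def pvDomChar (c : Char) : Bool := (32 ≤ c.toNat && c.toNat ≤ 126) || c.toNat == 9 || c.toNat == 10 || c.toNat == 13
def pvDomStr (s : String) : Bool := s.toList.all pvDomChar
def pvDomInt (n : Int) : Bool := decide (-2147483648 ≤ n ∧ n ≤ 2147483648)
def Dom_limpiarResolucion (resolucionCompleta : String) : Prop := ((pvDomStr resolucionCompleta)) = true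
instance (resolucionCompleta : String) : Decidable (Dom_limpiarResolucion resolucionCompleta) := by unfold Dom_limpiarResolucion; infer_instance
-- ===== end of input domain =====

-- B drops the prefix before the first digit in one slice instead of A's flag-and-accumulate loop (objective: simpler).

-- ===== PORT A =====
-- A's loop state: (resolucion, addNumber); append char when flag set or char is a digit.
def limpiarResolucionStep (st : List Char × Bool) (c : Char) : List Char × Bool :=
  if st.2 then (st.1 ++ [c], st.2)
  else if PySem.Chars.isdigit c then (st.1 ++ [c], true)
  else st

def limpiarResolucion (resolucionCompleta : String) : String :=
  String.mk (resolucionCompleta.toList.foldl limpiarResolucionStep ([], false)).1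

-- ===== PORT B =====
-- B: index of first digit, then one slice to the end; '' if no digit = dropWhile non-digit.
def limpiarResolucion_alt (resolucionCompleta : String) : String :=
  String.mk (resolucionCompleta.toList.dropWhile (fun c => !PySem.Chars.isdigit c))

-- ===== PRECONDITION & SPEC =====
def Spec_limpiarResolucion (resolucionCompleta : String) (out : String) : Prop := out = limpiarResolucion_alt resolucionCompleta
instance (resolucionCompleta : String) (out : String) : Decidable (Spec_limpiarResolucion resolucionCompleta out) := by unfold Spec_limpiarResolucion; infer_instance

-- ===== CLAIM (what is proved, stated in full; the proofs are below) =====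
def Claim_equal_limpiarResolucion : Prop := ∀ (resolucionCompleta : String), Dom_limpiarResolucion resolucionCompleta → Spec_limpiarResolucion resolucionCompleta (limpiarResolucion resolucionCompleta)

-- ===== LEMMAS AND PROOFS =====
theorem foldl_step_true (cs : List Char) (acc : List Char) :
    cs.foldl limpiarResolucionStep (acc, true) = (acc ++ cs, true) := by
  induction cs generalizing acc with
  | nil => simp
  | cons c cs ih => simp [limpiarResolucionStep, ih]

theorem foldl_step_false (cs : List Char) (acc : List Char) :
    (cs.foldl limpiarResolucionStep (acc, false)).1
      = acc ++ cs.dropWhile (fun c => !PySem.Chars.isdigit c) := by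
  induction cs generalizing acc with
  | nil => simp
  | cons c cs ih =>
    by_cases h : PySem.Chars.isdigit c
    · simp [limpiarResolucionStep, h, List.dropWhile, foldl_step_true]
    · simp [limpiarResolucionStep, h, List.dropWhile, ih]

-- ===== VERDICT (by name: the statement is the Claim_ definition above) =====
theorem limpiarResolucion_spec : Claim_equal_limpiarResolucion := by
  intro s _
  show _ = _
  simp [limpiarResolucion, limpiarResolucion_alt, foldl_step_false]
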